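-- pv_equiv track=rewrite | github.com/KennethCao/WebResearchAssistant | app/nlp/summarizer.py | _simple_summary
-- ===== SOURCE A (Python) =====
-- def _simple_summary(text: str, max_length: int = 150) -> str:
--     """简单的摘要方法（作为后备方案）"""
--     sentences = text.split('.')
--     summary = []
--     current_length = 0
--
--     for sentence in sentences:
--         if current_length + len(sentence) > max_length:
--             break
--         summary.append(sentence)
--         current_length += len(sentence)
--
--     return '. '.join(summary) + '.'
-- ===== SOURCE B (Python) =====
-- def _simple_summary(text: str, max_length: int = 150) -> str:
--     """Two-phase: build prefix-sum table of sentence lengths, find cutoff, slice and join."""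
--     sentences = text.split('.')
--     sums = []
--     total = 0
--     for s in sentences:
--         total += len(s)
--         sums.append(total)
--     k = next((i for i, c in enumerate(sums) if c > max_length), len(sentences))
--     return '. '.join(sentences[:k]) + '.'
-- ===== Notes on version B (the rewrite author's own statement) =====
-- stated objective: alternative
-- what changed: Replaces the greedy accumulate-and-break loop with a prefix-sum table, a first-exceeding-index search, and a slice-then-join.
import Mathlib
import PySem

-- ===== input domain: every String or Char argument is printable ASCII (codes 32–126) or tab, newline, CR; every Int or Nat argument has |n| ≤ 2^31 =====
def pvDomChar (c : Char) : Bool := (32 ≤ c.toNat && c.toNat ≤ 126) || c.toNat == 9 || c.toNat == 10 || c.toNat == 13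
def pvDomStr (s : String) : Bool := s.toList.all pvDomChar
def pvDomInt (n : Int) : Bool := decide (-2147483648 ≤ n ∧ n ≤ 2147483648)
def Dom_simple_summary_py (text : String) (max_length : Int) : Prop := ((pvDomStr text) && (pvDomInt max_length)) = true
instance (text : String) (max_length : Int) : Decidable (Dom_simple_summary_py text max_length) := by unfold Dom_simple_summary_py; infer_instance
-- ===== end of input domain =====

-- B replaces A's greedy accumulate-and-break loop by a prefix-sum table, a
-- first-exceeding-index search, and a slice-then-join (alternative decomposition).

-- ===== PORT A =====
-- greedy loop: append sentences while the running length stays ≤ max_length, break otherwise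
def aLoop (max_length : Int) : List String → Int → List String
  | [], _ => []
  | s :: rest, cur =>
    if cur + PySem.Str.len s > max_length then []
    else s :: aLoop max_length rest (cur + PySem.Str.len s)

def simple_summary_py (text : String) (max_length : Int) : String :=
  let sentences := (PySem.Str.split? text ".").getD []
  let summary := aLoop max_length sentences 0
  PySem.Str.join ". " summary ++ "."

-- ===== PORT B =====
-- prefix sums of sentence lengths (sums[i] = total length of sentences[0..i])
def bSums (total : Int) : List String → List Int
  | [] => []
  | s :: rest => (total + PySem.Str.len s) :: bSums (total + PySem.Str.len s) rest

def simple_summary_py_alt (text : String) (max_length : Int) : String :=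
  let sentences := (PySem.Str.split? text ".").getD []
  let sums := bSums 0 sentences
  let k := (sums.findIdx? (fun c => c > max_length)).getD sentences.length
  PySem.Str.join ". " (sentences.take k) ++ "."

-- ===== PRECONDITION & SPEC =====
def Spec_simple_summary_py (text : String) (max_length : Int) (out : String) : Prop := out = simple_summary_py_alt text max_length
instance (text : String) (max_length : Int) (out : String) : Decidable (Spec_simple_summary_py text max_length out) := by unfold Spec_simple_summary_py; infer_instance

-- ===== CLAIM (what is proved, stated in full; the proofs are below) =====
def Claim_equal_simple_summary_py : Prop := ∀ (text : String) (max_length : Int), Dom_simple_summary_py text max_length → Spec_simple_summary_py text max_length (simple_summary_py text max_length)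

-- ===== LEMMAS AND PROOFS =====

-- The greedy loop produces exactly the prefix cut at the first prefix sum exceeding max_length.
theorem aLoop_eq_take (max_length : Int) (ss : List String) (cur : Int) :
    aLoop max_length ss cur =
      ss.take (((bSums cur ss).findIdx? (fun c => c > max_length)).getD ss.length) := by
  induction ss generalizing cur with
  | nil => simp [aLoop, bSums]
  | cons s rest ih =>
    by_cases h : max_length < cur + (s.length : Int)
    · simp [aLoop, bSums, List.findIdx?_cons, PySem.Str.len, h]
    · simp only [aLoop, bSums, List.findIdx?_cons, PySem.Str.len, gt_iff_lt, ih]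
      cases hf : List.findIdx? (fun c => decide (max_length < c))
          (bSums (cur + (s.length : Int)) rest) with
      | none => simp [h]
      | some i => simp [h]

-- ===== VERDICT (by name: the statement is the Claim_ definition above) =====
theorem simple_summary_py_spec : Claim_equal_simple_summary_py := by
  intro text max_length _
  unfold Spec_simple_summary_py simple_summary_py simple_summary_py_alt
  simp only [aLoop_eq_take]
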